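-- pv_equiv track=rewrite | github.com/reolis/Python-Pract-01 | pract_01.py | is_path_valid
-- ===== SOURCE A (Python) =====
-- def is_path_valid(path):
--     valid_transitions = {
--         'H': {'1', '2', '3', '4'}, # Коридор соединяет все комнаты
--         '1': {'H'},                 # Комната 1 соединяется только с коридором
--         '2': {'H'},                 # Комната 2 соединяется только с коридором
--         '3': {'H'},                 # Комната 3 соединяется только с коридором
--         '4': {'H'}                  # Комната 4 соединяется только с коридором
--     }
--
--     if not path:
--         return False
--
--     if path[0] != 'H' and path[-1] != 'H':
--         return False
--
--     for i in range(len(path) - 1):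
--         current = path[i]
--         next_item = path[i + 1]
--
--         if next_item not in valid_transitions.get(current, {}):
--             return False
--
--     return True
-- ===== SOURCE B (Python) =====
-- def is_path_valid(path):
--     # Two-state DFA scan: expect 'H' and a room alternately, toggling one flag.
--     if not path:
--         return False
--     if 'H' not in (path[0], path[-1]):
--         return False
--     rooms = {'1', '2', '3', '4'}
--     expect_h = path[0] == 'H'
--     for x in path:
--         if expect_h:
--             if x != 'H':
--                 return False
--         else:
--             if x not in rooms:
--                 return False
--         expect_h = not expect_h
--     return True
-- ===== Notes on version B (the rewrite author's own statement) =====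
-- stated objective: alternative
-- what changed: Replaced the pairwise transition-table lookup over consecutive elements with a single-flag two-state DFA scan that alternately expects 'H' and a room.
import Mathlib
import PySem

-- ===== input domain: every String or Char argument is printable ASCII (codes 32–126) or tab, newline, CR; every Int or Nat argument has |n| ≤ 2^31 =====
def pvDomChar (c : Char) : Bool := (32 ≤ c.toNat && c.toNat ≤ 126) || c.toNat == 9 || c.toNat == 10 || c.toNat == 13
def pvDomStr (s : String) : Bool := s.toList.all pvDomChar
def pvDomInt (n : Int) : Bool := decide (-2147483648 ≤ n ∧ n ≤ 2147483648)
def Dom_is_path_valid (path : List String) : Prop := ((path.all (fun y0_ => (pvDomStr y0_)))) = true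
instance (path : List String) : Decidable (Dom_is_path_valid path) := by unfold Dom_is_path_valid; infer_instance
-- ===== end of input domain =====

-- B replaces A's pairwise transition-table check by a single-flag two-state DFA scan (alternative, same cost).


-- ===== PORT A =====
-- A's dict literal 'valid_transitions' with .get(current, {}) default, as a key-case function
def pvVT (c : String) : List String :=
  if c == "H" then ["1", "2", "3", "4"]
  else if c == "1" || c == "2" || c == "3" || c == "4" then ["H"]
  else []

-- A's loop over i in range(len(path)-1) comparing path[i], path[i+1], with early return False
def pvLoopA : List String → Bool
  | c :: n :: rest => if n ∈ pvVT c then pvLoopA (n :: rest) else false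
  | _ => true

def is_path_valid (path : List String) : Bool :=
  match path with
  | [] => false
  | p0 :: rest =>
    -- path[-1] on a nonempty list is its last element
    if p0 != "H" && (p0 :: rest).getLastD "" != "H" then false
    else pvLoopA (p0 :: rest)

-- ===== PORT B =====
def pvRooms : List String := ["1", "2", "3", "4"]

-- B's loop: expect_h flag toggled each step
def pvScanB : Bool → List String → Bool
  | _, [] => true
  | e, x :: rest =>
    if e then (if x != "H" then false else pvScanB (!e) rest)
    else (if !(pvRooms.contains x) then false else pvScanB (!e) rest)

def is_path_valid_alt (path : List String) : Bool :=
  match path with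
  | [] => false
  | p0 :: rest =>
    if !(p0 == "H" || (p0 :: rest).getLastD "" == "H") then false
    else pvScanB (p0 == "H") (p0 :: rest)

-- ===== PRECONDITION & SPEC =====
def Spec_is_path_valid (path : List String) (out : Bool) : Prop := out = is_path_valid_alt path
instance (path : List String) (out : Bool) : Decidable (Spec_is_path_valid path out) := by unfold Spec_is_path_valid; infer_instance

-- ===== CLAIM (what is proved, stated in full; the proofs are below) =====
def Claim_equal_is_path_valid : Prop := ∀ (path : List String), Dom_is_path_valid path → Spec_is_path_valid path (is_path_valid path)

-- ===== LEMMAS AND PROOFS =====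
set_option maxRecDepth 10000

theorem pvVT_room (n : String) (h : pvRooms.contains n = true) : pvVT n = ["H"] := by
  simp only [pvRooms, List.contains_cons, List.contains_nil, Bool.or_eq_true, beq_iff_eq] at h
  rcases h with h | h | h | h | h
  · subst h; rfl
  · subst h; rfl
  · subst h; rfl
  · subst h; rfl
  · simp at h

theorem pvVT_other (n : String) (h1 : pvRooms.contains n = false) (h2 : (n == "H") = false) :
    pvVT n = [] := by
  simp only [pvRooms, List.contains_cons, List.contains_nil, Bool.or_false,
    Bool.or_eq_false_iff] at h1
  simp [pvVT, h2, h1.1, h1.2.1, h1.2.2.1, h1.2.2.2]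

theorem pv_memVT_H (x : String) : x ∈ pvVT "H" ↔ pvRooms.contains x = true := by
  rw [show pvVT "H" = ["1", "2", "3", "4"] from rfl]
  simp only [pvRooms, List.contains_cons, List.contains_nil, Bool.or_false, Bool.or_eq_true,
    beq_iff_eq, List.mem_cons, List.not_mem_nil, or_false]

theorem pv_main (rest : List String) :
    (pvLoopA ("H" :: rest) = pvScanB false rest) ∧
    (∀ n, pvRooms.contains n = true → pvLoopA (n :: rest) = pvScanB true rest) := by
  induction rest with
  | nil => exact ⟨rfl, fun n _ => rfl⟩
  | cons x rest ih =>
    constructor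
    · show (if x ∈ pvVT "H" then pvLoopA (x :: rest) else false)
         = (if (!(pvRooms.contains x)) = true then false else pvScanB true rest)
      by_cases hx : pvRooms.contains x = true
      · rw [if_pos ((pv_memVT_H x).mpr hx), hx]
        exact ih.2 x hx
      · have hxf : pvRooms.contains x = false := eq_false_of_ne_true hx
        rw [if_neg (fun hm => hx ((pv_memVT_H x).mp hm)), hxf]
        rfl
    · intro n hn
      show (if x ∈ pvVT n then pvLoopA (x :: rest) else false)
         = (if (x != "H") = true then false else pvScanB false rest)
      rw [pvVT_room n hn]
      by_cases hx : x = "H"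
      · subst hx
        rw [if_pos (by simp), if_neg (by simp), ih.1]
      · rw [if_neg (by simp [hx]), if_pos (by simp [bne, hx])]

theorem pv_body (p0 : String) (rest : List String)
    (hguard : (p0 == "H") = true ∨ ((p0 :: rest).getLastD "" == "H") = true) :
    pvLoopA (p0 :: rest) = pvScanB (p0 == "H") (p0 :: rest) := by
  by_cases hH : (p0 == "H") = true
  · have hp : p0 = "H" := by simpa using hH
    subst hp
    rw [show ("H" == "H") = true from rfl]
    show pvLoopA ("H" :: rest)
       = (if ("H" != "H") = true then false else pvScanB (!true) rest)
    rw [if_neg (by simp), (pv_main rest).1]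
    rfl
  · have hHf : (p0 == "H") = false := eq_false_of_ne_true hH
    rw [hHf]
    show pvLoopA (p0 :: rest)
       = (if (!(pvRooms.contains p0)) = true then false else pvScanB (!false) rest)
    by_cases hr : pvRooms.contains p0 = true
    · rw [hr]
      exact (pv_main rest).2 p0 hr
    · have hrf : pvRooms.contains p0 = false := eq_false_of_ne_true hr
      rw [hrf]
      show pvLoopA (p0 :: rest) = false
      rcases hguard with hg | hg
      · exact absurd hg hH
      · cases rest with
        | nil =>
          exfalso
          simp only [List.getLastD, beq_iff_eq, List.getLast_singleton] at hg
          rw [hg] at hHf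
          simp at hHf
        | cons n rest' =>
          show (if n ∈ pvVT p0 then pvLoopA (n :: rest') else false) = false
          rw [pvVT_other p0 hrf hHf]
          simp

-- ===== VERDICT (by name: the statement is the Claim_ definition above) =====
theorem is_path_valid_spec : Claim_equal_is_path_valid := by
  intro path _
  unfold Spec_is_path_valid
  cases path with
  | nil => rfl
  | cons p0 rest =>
    show (if (p0 != "H" && (p0 :: rest).getLastD "" != "H") = true then false
          else pvLoopA (p0 :: rest))
       = (if (!(p0 == "H" || (p0 :: rest).getLastD "" == "H")) = true then false
          else pvScanB (p0 == "H") (p0 :: rest))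
    have hcond : (p0 != "H" && (p0 :: rest).getLastD "" != "H")
        = !(p0 == "H" || (p0 :: rest).getLastD "" == "H") := by
      simp only [bne]
      cases p0 == "H" <;> cases (p0 :: rest).getLastD "" == "H" <;> rfl
    rw [hcond]
    cases hb : (p0 == "H" || (p0 :: rest).getLastD "" == "H") with
    | false => rfl
    | true => exact pv_body p0 rest (by simpa [Bool.or_eq_true] using hb)
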